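-- pv_equiv track=rewrite | github.com/MIKEGUIJARRO/leetcode | matrix/3070. Count Submatrices with Top-Left Element and Sum Less Than k.py | build_prefix_sum_range_matrix_tb
-- ===== SOURCE A (Python) =====
-- from typing import List
--
-- def build_prefix_sum_range_matrix_tb(grid: List[List[int]]) -> List[List[int]]:
--     prefix_sum_grid = grid.copy()
--
--     for col_i in range(0, len(grid[0])):
--         counter = 0
--         for row_j in range(0, len(grid)):
--             cell = grid[row_j][col_i]
--             counter = counter + cell
--             prefix_sum_grid[row_j][col_i] = counter
--
--     return prefix_sum_grid
-- ===== SOURCE B (Python) =====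
-- from typing import List
--
-- def build_prefix_sum_range_matrix_tb(grid: List[List[int]]) -> List[List[int]]:
--     prefix_sum_grid = grid.copy()
--
--     for row_j in range(1, len(grid)):
--         for col_i in range(0, len(grid[0])):
--             prefix_sum_grid[row_j][col_i] = prefix_sum_grid[row_j - 1][col_i] + grid[row_j][col_i]
--
--     return prefix_sum_grid
-- ===== Notes on version B (the rewrite author's own statement) =====
-- stated objective: alternative
-- what changed: B reverses the loop nesting: instead of an outer column loop carrying a running scalar counter down each column, B iterates rows outward starting from row 1 and computes each cell from the already-accumulated previous row (prefix[j][i] = prefix[j-1][i] + grid[j][i]), leaving row 0 untouched.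
-- crash fix: On the empty grid A raises IndexError (it evaluates grid[0]) while B's outer loop is empty and it returns []. — e.g. on build_prefix_sum_range_matrix_tb([]): A raises IndexError, B returns []
import Mathlib
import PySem

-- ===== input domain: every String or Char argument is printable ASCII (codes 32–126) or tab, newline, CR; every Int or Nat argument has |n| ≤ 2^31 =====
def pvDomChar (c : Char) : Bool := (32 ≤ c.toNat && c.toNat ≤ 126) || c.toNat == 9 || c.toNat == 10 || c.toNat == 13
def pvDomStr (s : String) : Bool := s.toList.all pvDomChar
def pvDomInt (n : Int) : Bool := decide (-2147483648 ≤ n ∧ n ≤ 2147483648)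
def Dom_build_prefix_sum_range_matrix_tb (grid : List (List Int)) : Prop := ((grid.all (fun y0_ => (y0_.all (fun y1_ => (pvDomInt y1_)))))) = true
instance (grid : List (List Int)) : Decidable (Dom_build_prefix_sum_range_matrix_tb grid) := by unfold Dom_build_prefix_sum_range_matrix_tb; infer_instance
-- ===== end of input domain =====

-- B reverses the loop nesting: an outer row loop from row 1 computes each row from the already-accumulated
-- previous row instead of carrying a per-column running counter (objective: alternative decomposition).
-- Both Pythons mutate the input's rows in place identically (shallow copy); the equivalence proved here is
-- about the returned value.

-- shared cell read/write helpers (Python's g[j][i] read and g[j][i] = v on the aliased row lists)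
def pvCell (g : List (List Int)) (j i : Nat) : Int := (g.getD j []).getD i 0
def pvSet (g : List (List Int)) (j i : Nat) (v : Int) : List (List Int) :=
  g.modify j (fun r => r.set i v)

-- ===== PORT A =====
-- prefix_sum_grid = grid.copy() is shallow: the rows written and the rows read via `grid` are the same
-- mutable lists, so the port carries a single matrix state; each cell is read before that cell is written.
def build_prefix_sum_range_matrix_tb (grid : List (List Int)) : List (List Int) :=
  (List.range (grid.headD []).length).foldl
    (fun g col_i =>
      ((List.range grid.length).foldl
        (fun (st : List (List Int) × Int) row_j =>
          let cell := pvCell st.1 row_j col_i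
          let counter := st.2 + cell
          (pvSet st.1 row_j col_i counter, counter))
        (g, 0)).1)
    grid

-- ===== PORT B =====
def build_prefix_sum_range_matrix_tb_alt (grid : List (List Int)) : List (List Int) :=
  (List.range' 1 (grid.length - 1)).foldl
    (fun g row_j =>
      (List.range (grid.headD []).length).foldl
        (fun g2 col_i =>
          pvSet g2 row_j col_i (pvCell g2 (row_j - 1) col_i + pvCell g2 row_j col_i))
        g)
    grid

-- ===== PRECONDITION & SPEC =====
-- Pre_ excludes exactly the inputs where Python A raises IndexError: the empty grid (grid[0]) and ragged
-- grids with some row shorter than row 0 (grid[row_j][col_i]).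
def Pre_build_prefix_sum_range_matrix_tb (grid : List (List Int)) : Prop :=
  grid ≠ [] ∧ ∀ r ∈ grid, (grid.headD []).length ≤ r.length
instance (grid : List (List Int)) : Decidable (Pre_build_prefix_sum_range_matrix_tb grid) := by
  unfold Pre_build_prefix_sum_range_matrix_tb; infer_instance

def pvWitness_build_prefix_sum_range_matrix_tb : List (List Int) := [[1, 2], [3, 4], [-1, 0]]

-- On the empty grid A raises IndexError (it evaluates grid[0]) while B's outer loop is empty and it returns [].
def Raises_build_prefix_sum_range_matrix_tb (grid : List (List Int)) : Prop := grid = []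
instance (grid : List (List Int)) : Decidable (Raises_build_prefix_sum_range_matrix_tb grid) := by
  unfold Raises_build_prefix_sum_range_matrix_tb; infer_instance
def pvRaiseWitness_build_prefix_sum_range_matrix_tb : List (List Int) := []
def pvRaiseWitnessOut_build_prefix_sum_range_matrix_tb : List (List Int) := []

def Spec_build_prefix_sum_range_matrix_tb (grid : List (List Int)) (out : List (List Int)) : Prop := out = build_prefix_sum_range_matrix_tb_alt grid
instance (grid : List (List Int)) (out : List (List Int)) : Decidable (Spec_build_prefix_sum_range_matrix_tb grid out) := by unfold Spec_build_prefix_sum_range_matrix_tb; infer_instance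

-- ===== CLAIM (what is proved, stated in full; the proofs are below) =====
def Claim_equal_build_prefix_sum_range_matrix_tb : Prop := ∀ (grid : List (List Int)), Dom_build_prefix_sum_range_matrix_tb grid → Pre_build_prefix_sum_range_matrix_tb grid → Spec_build_prefix_sum_range_matrix_tb grid (build_prefix_sum_range_matrix_tb grid)
def Claim_raises_build_prefix_sum_range_matrix_tb : Prop := (∀ (grid : List (List Int)), Dom_build_prefix_sum_range_matrix_tb grid → Raises_build_prefix_sum_range_matrix_tb grid → ¬ Pre_build_prefix_sum_range_matrix_tb grid) ∧ (Dom_build_prefix_sum_range_matrix_tb (pvRaiseWitness_build_prefix_sum_range_matrix_tb) ∧ Raises_build_prefix_sum_range_matrix_tb (pvRaiseWitness_build_prefix_sum_range_matrix_tb) ∧ build_prefix_sum_range_matrix_tb_alt (pvRaiseWitness_build_prefix_sum_range_matrix_tb) = pvRaiseWitnessOut_build_prefix_sum_range_matrix_tb)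

-- ===== LEMMAS AND PROOFS =====

-- "g has the same shape (outer length and every row length) as grid"
def pvShape (grid g : List (List Int)) : Prop :=
  g.length = grid.length ∧ ∀ j : Nat, (g.getD j []).length = (grid.getD j []).length

-- prefix sum of column i down to (and including) row j
def pvColsum (grid : List (List Int)) (j i : Nat) : Int :=
  ∑ k ∈ Finset.range (j + 1), pvCell grid k i

theorem pvCell_getD_eq (g : List (List Int)) (j i : Nat) :
    pvCell g j i = ((g[j]?).getD []).getD i 0 := by
  simp [pvCell, List.getD_eq_getElem?_getD]

theorem length_pvSet (g : List (List Int)) (j i : Nat) (v : Int) :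
    (pvSet g j i v).length = g.length := by
  simp [pvSet]

theorem rowlen_pvSet (g : List (List Int)) (j i : Nat) (v : Int) (j' : Nat) :
    ((pvSet g j i v).getD j' []).length = (g.getD j' []).length := by
  simp only [List.getD_eq_getElem?_getD, pvSet, List.getElem?_modify]
  cases g[j']? with
  | none => simp
  | some r => by_cases h : j = j' <;> simp [h]

theorem pvShape_pvSet {grid g : List (List Int)} (hs : pvShape grid g) (j i : Nat) (v : Int) :
    pvShape grid (pvSet g j i v) := by
  exact ⟨by rw [length_pvSet]; exact hs.1, fun j' => by rw [rowlen_pvSet]; exact hs.2 j'⟩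

theorem pvCell_pvSet_ne_row {j j' : Nat} (g : List (List Int)) (i : Nat) (v : Int) (i' : Nat)
    (h : j' ≠ j) : pvCell (pvSet g j i v) j' i' = pvCell g j' i' := by
  rw [pvCell_getD_eq, pvCell_getD_eq]
  simp only [pvSet, List.getElem?_modify]
  cases g[j']? with
  | none => simp
  | some r => simp [Ne.symm h]

theorem pvCell_pvSet_ne_col {i i' : Nat} (g : List (List Int)) (j : Nat) (v : Int) (j' : Nat)
    (h : i' ≠ i) : pvCell (pvSet g j i v) j' i' = pvCell g j' i' := by
  rw [pvCell_getD_eq, pvCell_getD_eq]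
  simp only [pvSet, List.getElem?_modify]
  cases g[j']? with
  | none => simp
  | some r =>
    by_cases hj : j = j'
    · simp only [hj, Option.getD_some]
      simp [List.getD_eq_getElem?_getD, Ne.symm h]
    · simp [hj]

theorem pvCell_pvSet_self {g : List (List Int)} {j i : Nat} (v : Int)
    (hj : j < g.length) (hi : i < (g.getD j []).length) :
    pvCell (pvSet g j i v) j i = v := by
  rw [pvCell_getD_eq]
  simp only [pvSet, List.getElem?_modify]
  rw [List.getElem?_eq_getElem hj]
  have hlen : i < (g[j]).length := by
    rwa [List.getD_eq_getElem _ _ hj] at hi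
  simp [List.getD_eq_getElem?_getD, hlen]

theorem pvEq_of_cells {grid R S : List (List Int)} (hR : pvShape grid R) (hS : pvShape grid S)
    (h : ∀ j i, pvCell R j i = pvCell S j i) : R = S := by
  apply List.ext_getElem (hR.1.trans hS.1.symm)
  intro j hjR hjS
  apply List.ext_getElem
  · have := (hR.2 j).trans (hS.2 j).symm
    rwa [List.getD_eq_getElem _ _ hjR, List.getD_eq_getElem _ _ hjS] at this
  · intro i hiR hiS
    have := h j i
    rwa [pvCell, pvCell, List.getD_eq_getElem _ _ hjR, List.getD_eq_getElem _ _ hjS,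
      List.getD_eq_getElem _ _ hiR, List.getD_eq_getElem _ _ hiS] at this

theorem pre_rowlen {grid : List (List Int)} (hpre : Pre_build_prefix_sum_range_matrix_tb grid)
    {j : Nat} (hj : j < grid.length) :
    (grid.headD []).length ≤ (grid.getD j []).length := by
  rw [List.getD_eq_getElem _ _ hj]
  exact hpre.2 _ (grid.getElem_mem hj)

-- A's inner loop over rows, for one fixed column, processed up to m rows
theorem A_inner (grid : List (List Int)) (hpre : Pre_build_prefix_sum_range_matrix_tb grid)
    (c : Nat) (hc : c < (grid.headD []).length)
    (g : List (List Int)) (hs : pvShape grid g)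
    (hcol : ∀ j, pvCell g j c = pvCell grid j c)
    (m : Nat) (hm : m ≤ grid.length) :
    pvShape grid ((List.range m).foldl
        (fun (st : List (List Int) × Int) row_j =>
          let cell := pvCell st.1 row_j c
          let counter := st.2 + cell
          (pvSet st.1 row_j c counter, counter)) (g, 0)).1 ∧
    (∀ j i, pvCell ((List.range m).foldl
        (fun (st : List (List Int) × Int) row_j =>
          let cell := pvCell st.1 row_j c
          let counter := st.2 + cell
          (pvSet st.1 row_j c counter, counter)) (g, 0)).1 j i =
        if i = c ∧ j < m then pvColsum grid j c else pvCell g j i) ∧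
    ((List.range m).foldl
        (fun (st : List (List Int) × Int) row_j =>
          let cell := pvCell st.1 row_j c
          let counter := st.2 + cell
          (pvSet st.1 row_j c counter, counter)) (g, 0)).2 =
      ∑ k ∈ Finset.range m, pvCell grid k c := by
  induction m with
  | zero => exact ⟨by simpa using hs, fun j i => by simp, by simp⟩
  | succ m ih =>
    have hm' : m ≤ grid.length := Nat.le_of_succ_le hm
    obtain ⟨ih1, ih2, ih3⟩ := ih hm'
    rw [List.range_succ, List.foldl_append, List.foldl_cons, List.foldl_nil]
    set st := (List.range m).foldl
        (fun (st : List (List Int) × Int) row_j =>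
          let cell := pvCell st.1 row_j c
          let counter := st.2 + cell
          (pvSet st.1 row_j c counter, counter)) (g, 0) with hst
    have hcell : pvCell st.1 m c = pvCell grid m c := by
      rw [ih2 m c]; simp [hcol m]
    have hcnt : st.2 + pvCell st.1 m c = pvColsum grid m c := by
      rw [hcell, ih3, pvColsum, Finset.sum_range_succ]
    have hmn : m < grid.length := hm
    have hjlen : m < st.1.length := by rw [ih1.1]; exact hmn
    have hilen : c < (st.1.getD m []).length := by
      rw [ih1.2 m]; exact lt_of_lt_of_le hc (pre_rowlen hpre hmn)
    refine ⟨pvShape_pvSet ih1 _ _ _, ?_, by simpa using hcnt⟩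
    intro j i
    simp only []
    by_cases hj : j = m
    · subst hj
      by_cases hi : i = c
      · subst hi
        rw [pvCell_pvSet_self _ hjlen hilen, hcnt]
        simp
      · rw [pvCell_pvSet_ne_col _ _ _ _ hi, ih2 j i]
        simp [hi]
    · rw [pvCell_pvSet_ne_row _ _ _ _ hj, ih2 j i]
      by_cases hi : i = c
      · subst hi
        by_cases hjm : j < m
        · simp [hjm, Nat.lt_succ_of_lt hjm]
        · have : ¬ j < m + 1 := by omega
          simp [hjm, this]
      · simp [hi]

-- A's outer loop over columns, processed up to m columns
theorem A_outer (grid : List (List Int)) (hpre : Pre_build_prefix_sum_range_matrix_tb grid)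
    (m : Nat) (hm : m ≤ (grid.headD []).length) :
    pvShape grid ((List.range m).foldl
      (fun g col_i =>
        ((List.range grid.length).foldl
          (fun (st : List (List Int) × Int) row_j =>
            let cell := pvCell st.1 row_j col_i
            let counter := st.2 + cell
            (pvSet st.1 row_j col_i counter, counter))
          (g, 0)).1) grid) ∧
    ∀ j i, pvCell ((List.range m).foldl
      (fun g col_i =>
        ((List.range grid.length).foldl
          (fun (st : List (List Int) × Int) row_j =>
            let cell := pvCell st.1 row_j col_i
            let counter := st.2 + cell
            (pvSet st.1 row_j col_i counter, counter))
          (g, 0)).1) grid) j i =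
      if i < m ∧ j < grid.length then pvColsum grid j i else pvCell grid j i := by
  induction m with
  | zero => exact ⟨by simpa using ⟨rfl, fun j => rfl⟩, fun j i => by simp⟩
  | succ m ih =>
    have hm' : m ≤ (grid.headD []).length := Nat.le_of_succ_le hm
    obtain ⟨ih1, ih2⟩ := ih hm'
    rw [List.range_succ, List.foldl_append, List.foldl_cons, List.foldl_nil]
    set G := (List.range m).foldl
      (fun g col_i =>
        ((List.range grid.length).foldl
          (fun (st : List (List Int) × Int) row_j =>
            let cell := pvCell st.1 row_j col_i
            let counter := st.2 + cell
            (pvSet st.1 row_j col_i counter, counter))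
          (g, 0)).1) grid with hG
    have hcol : ∀ j, pvCell G j m = pvCell grid j m := by
      intro j; rw [ih2 j m]; simp
    obtain ⟨s1, s2, _⟩ := A_inner grid hpre m hm G ih1 hcol grid.length le_rfl
    refine ⟨s1, ?_⟩
    intro j i
    rw [s2 j i, ih2 j i]
    by_cases hi : i = m
    · subst hi
      by_cases hj : j < grid.length
      · simp [hj]
      · simp [hj]
    · by_cases hi' : i < m
      · have : i < m + 1 := Nat.lt_succ_of_lt hi'
        simp [hi, hi', this]
      · have : ¬ i < m + 1 := by omega
        simp [hi, hi', this]

-- B's inner loop over columns, for one fixed row, processed up to m columns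
theorem B_inner (grid : List (List Int)) (hpre : Pre_build_prefix_sum_range_matrix_tb grid)
    (row : Nat) (hrow1 : 1 ≤ row) (hrown : row < grid.length)
    (g : List (List Int)) (hs : pvShape grid g)
    (hprev : ∀ i, i < (grid.headD []).length → pvCell g (row - 1) i = pvColsum grid (row - 1) i)
    (hcur : ∀ i, pvCell g row i = pvCell grid row i)
    (m : Nat) (hm : m ≤ (grid.headD []).length) :
    pvShape grid ((List.range m).foldl
      (fun g2 col_i =>
        pvSet g2 row col_i (pvCell g2 (row - 1) col_i + pvCell g2 row col_i)) g) ∧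
    ∀ j i, pvCell ((List.range m).foldl
      (fun g2 col_i =>
        pvSet g2 row col_i (pvCell g2 (row - 1) col_i + pvCell g2 row col_i)) g) j i =
      if j = row ∧ i < m then pvColsum grid row i else pvCell g j i := by
  obtain ⟨r, rfl⟩ : ∃ r, row = r + 1 := ⟨row - 1, by omega⟩
  have hrr : r + 1 - 1 = r := rfl
  simp only [hrr] at hprev
  induction m with
  | zero => exact ⟨hs, fun j i => by simp⟩
  | succ m ih =>
    have hm' : m ≤ (grid.headD []).length := Nat.le_of_succ_le hm
    obtain ⟨ih1, ih2⟩ := ih hm'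
    rw [List.range_succ, List.foldl_append, List.foldl_cons, List.foldl_nil]
    set G := (List.range m).foldl
      (fun g2 col_i =>
        pvSet g2 (r + 1) col_i (pvCell g2 (r + 1 - 1) col_i + pvCell g2 (r + 1) col_i)) g with hG
    simp only [hrr]
    have hprev' : pvCell G r m = pvColsum grid r m := by
      rw [ih2 r m]
      rw [if_neg (fun hc : _ ∧ _ => by omega), hprev m hm]
    have hcur' : pvCell G (r + 1) m = pvCell grid (r + 1) m := by
      rw [ih2 (r + 1) m]; simp [hcur m]
    have hsum : pvCell G r m + pvCell G (r + 1) m = pvColsum grid (r + 1) m := by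
      rw [hprev', hcur']; simp [pvColsum, Finset.sum_range_succ]
    have hjlen : r + 1 < G.length := by rw [ih1.1]; exact hrown
    have hilen : m < (G.getD (r + 1) []).length := by
      rw [ih1.2 (r + 1)]; exact lt_of_lt_of_le hm (pre_rowlen hpre hrown)
    refine ⟨pvShape_pvSet ih1 _ _ _, ?_⟩
    intro j i
    by_cases hj : j = r + 1
    · subst hj
      by_cases hi : i = m
      · subst hi
        rw [pvCell_pvSet_self _ hjlen hilen, hsum]
        simp
      · rw [pvCell_pvSet_ne_col _ _ _ _ hi, ih2 (r + 1) i]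
        have : (i < m) = (i < m + 1) := by
          simp only [eq_iff_iff]; omega
        simp [this]
    · rw [pvCell_pvSet_ne_row _ _ _ _ hj, ih2 j i]
      simp [hj]

-- B's outer loop over rows 1..m
theorem B_outer (grid : List (List Int)) (hpre : Pre_build_prefix_sum_range_matrix_tb grid)
    (m : Nat) (hm : m ≤ grid.length - 1) :
    pvShape grid ((List.range' 1 m).foldl
      (fun g row_j =>
        (List.range (grid.headD []).length).foldl
          (fun g2 col_i =>
            pvSet g2 row_j col_i (pvCell g2 (row_j - 1) col_i + pvCell g2 row_j col_i))
          g) grid) ∧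
    ∀ j i, pvCell ((List.range' 1 m).foldl
      (fun g row_j =>
        (List.range (grid.headD []).length).foldl
          (fun g2 col_i =>
            pvSet g2 row_j col_i (pvCell g2 (row_j - 1) col_i + pvCell g2 row_j col_i))
          g) grid) j i =
      if j ≤ m ∧ j < grid.length ∧ i < (grid.headD []).length then pvColsum grid j i
      else pvCell grid j i := by
  have hn : 0 < grid.length := List.length_pos_of_ne_nil hpre.1
  induction m with
  | zero =>
    refine ⟨by simpa using ⟨rfl, fun j => rfl⟩, ?_⟩
    intro j i
    simp only [List.range'_zero, List.foldl_nil]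
    split_ifs with h
    · have hj : j = 0 := by omega
      subst hj
      simp [pvColsum]
    · rfl
  | succ m ih =>
    have hm' : m ≤ grid.length - 1 := Nat.le_of_succ_le hm
    obtain ⟨ih1, ih2⟩ := ih hm'
    rw [List.range'_1_concat, List.foldl_append, List.foldl_cons, List.foldl_nil]
    set G := (List.range' 1 m).foldl
      (fun g row_j =>
        (List.range (grid.headD []).length).foldl
          (fun g2 col_i =>
            pvSet g2 row_j col_i (pvCell g2 (row_j - 1) col_i + pvCell g2 row_j col_i))
          g) grid with hG
    have hrown : 1 + m < grid.length := by omega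
    have hprev : ∀ i, i < (grid.headD []).length →
        pvCell G (1 + m - 1) i = pvColsum grid (1 + m - 1) i := by
      intro i hi
      have h1 : 1 + m - 1 = m := by omega
      rw [h1, ih2 m i]
      have : m < grid.length := by omega
      rw [if_pos ⟨le_rfl, this, hi⟩]
    have hcur : ∀ i, pvCell G (1 + m) i = pvCell grid (1 + m) i := by
      intro i
      rw [ih2 (1 + m) i]
      have : ¬ (1 + m ≤ m) := by omega
      rw [if_neg (fun h => this h.1)]
    obtain ⟨s1, s2⟩ := B_inner grid hpre (1 + m) (by omega) hrown G ih1 hprev hcur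
      (grid.headD []).length le_rfl
    refine ⟨s1, ?_⟩
    intro j i
    rw [s2 j i, ih2 j i]
    by_cases hi : i < (grid.headD []).length
    · by_cases hj : j = 1 + m
      · subst hj
        have h1 : 1 + m ≤ m + 1 := by omega
        rw [if_pos ⟨rfl, hi⟩, if_pos ⟨h1, hrown, hi⟩]
      · rw [if_neg (fun hc => hj hc.1)]
        by_cases h3 : j ≤ m ∧ j < grid.length ∧ i < (grid.headD []).length
        · rw [if_pos h3, if_pos ⟨by omega, h3.2⟩]
        · rw [if_neg h3, if_neg (fun hc => h3 ⟨by omega, hc.2⟩)]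
    · rw [if_neg (fun hc : _ ∧ _ => hi hc.2),
        if_neg (fun hc : _ ∧ _ ∧ _ => hi hc.2.2),
        if_neg (fun hc : _ ∧ _ ∧ _ => hi hc.2.2)]

-- ===== VERDICT (by name: the statement is the Claim_ definition above) =====
theorem build_prefix_sum_range_matrix_tb_spec : Claim_equal_build_prefix_sum_range_matrix_tb := by
  intro grid _ hpre
  unfold Spec_build_prefix_sum_range_matrix_tb
  have hA := A_outer grid hpre (grid.headD []).length le_rfl
  have hB := B_outer grid hpre (grid.length - 1) le_rfl
  have hn : 1 ≤ grid.length := by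
    cases grid with
    | nil => exact absurd rfl hpre.1
    | cons a l => simp
  refine pvEq_of_cells (grid := grid) ?_ ?_ ?_
  · exact hA.1
  · exact hB.1
  · intro j i
    unfold build_prefix_sum_range_matrix_tb build_prefix_sum_range_matrix_tb_alt
    rw [hA.2 j i, hB.2 j i]
    by_cases h1 : j < grid.length <;> by_cases h2 : i < (grid.headD []).length <;>
      simp [h1, h2] <;> omega

theorem build_prefix_sum_range_matrix_tb_raises : Claim_raises_build_prefix_sum_range_matrix_tb := by
  unfold Claim_raises_build_prefix_sum_range_matrix_tb
  constructor
  · intro grid _ hr hp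
    exact hp.1 hr
  · exact ⟨by decide, by decide, by decide⟩

-- witness self-check: B's port indeed returns the stated literal on the raise witness
theorem pvRaiseWitnessOut_ok :
    build_prefix_sum_range_matrix_tb_alt pvRaiseWitness_build_prefix_sum_range_matrix_tb =
      pvRaiseWitnessOut_build_prefix_sum_range_matrix_tb :=
  build_prefix_sum_range_matrix_tb_raises.2.2.2
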